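-- pv_equiv track=rewrite | github.com/PermutaTriangle/PermStruct | len_4_lists/correct_filter_insertion_encodable.py | is_incr_next_incr
-- ===== SOURCE A (Python) =====
-- def is_incr_next_incr(perm):
--     for i in range(len(perm) - 1):
--         if perm[i+1] < perm[i]:
--             for j in range(i+1,len(perm) - 1):
--                 if perm[j+1] < perm[j]:
--                     return False
--             break
--     return True
-- ===== SOURCE B (Python) =====
-- def is_incr_next_incr(perm):
--     # Split perm into its maximal nondecreasing runs; at most one descent
--     # means the list decomposes into at most two such runs.
--     runs = []
--     cur = []
--     for x in perm:
--         if cur and x < cur[-1]: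
--             runs.append(cur)
--             cur = [x]
--         else:
--             cur.append(x)
--     if cur:
--         runs.append(cur)
--     return len(runs) <= 2
-- ===== Notes on version B (the rewrite author's own statement) =====
-- stated objective: alternative
-- what changed: Replaces A's find-first-descent-then-verify nested loops with a greedy decomposition of the list into maximal nondecreasing runs, returning whether there are at most two runs.
import Mathlib
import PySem

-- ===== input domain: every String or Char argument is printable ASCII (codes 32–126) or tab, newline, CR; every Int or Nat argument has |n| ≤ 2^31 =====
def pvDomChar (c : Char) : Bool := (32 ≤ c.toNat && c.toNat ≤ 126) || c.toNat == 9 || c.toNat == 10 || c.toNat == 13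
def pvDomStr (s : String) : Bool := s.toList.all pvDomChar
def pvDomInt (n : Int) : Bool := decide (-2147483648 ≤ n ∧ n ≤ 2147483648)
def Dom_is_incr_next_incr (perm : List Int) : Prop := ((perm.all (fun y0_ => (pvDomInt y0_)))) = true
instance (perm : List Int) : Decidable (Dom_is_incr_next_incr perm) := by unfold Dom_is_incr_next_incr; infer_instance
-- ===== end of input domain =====

-- B replaces A's find-first-descent-then-verify nested loops with a greedy
-- decomposition into maximal nondecreasing runs, returning (number of runs ≤ 2).

-- ===== PORT A =====
-- inner loop: for j in range(i+1, len-1): checks the pairs of the suffix starting at i+1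
def pvInnerA : List Int → Bool
  | a :: b :: rest => if b < a then false else pvInnerA (b :: rest)
  | _ => true

-- outer loop: scan for the first descent, then run the inner loop on the suffix and break
def pvOuterA : List Int → Bool
  | a :: b :: rest => if b < a then pvInnerA (b :: rest) else pvOuterA (b :: rest)
  | _ => true

def is_incr_next_incr (perm : List Int) : Bool := pvOuterA perm

-- ===== PORT B =====
-- loop body: close the current run when x descends below its last element
def pvStepB (st : List (List Int) × List Int) (x : Int) : List (List Int) × List Int :=
  if st.2 ≠ [] ∧ x < st.2.getLast! then (st.1 ++ [st.2], [x]) else (st.1, st.2 ++ [x])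

-- after the loop: append the last run if nonempty, then compare the run count with 2
def pvFinishB (st : List (List Int) × List Int) : Bool :=
  decide ((if st.2 = [] then st.1 else st.1 ++ [st.2]).length ≤ 2)

def is_incr_next_incr_alt (perm : List Int) : Bool :=
  pvFinishB (perm.foldl pvStepB ([], []))

-- ===== PRECONDITION & SPEC =====
def Spec_is_incr_next_incr (perm : List Int) (out : Bool) : Prop := out = is_incr_next_incr_alt perm
instance (perm : List Int) (out : Bool) : Decidable (Spec_is_incr_next_incr perm out) := by unfold Spec_is_incr_next_incr; infer_instance

-- ===== CLAIM (what is proved, stated in full; the proofs are below) =====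
def Claim_equal_is_incr_next_incr : Prop := ∀ (perm : List Int), Dom_is_incr_next_incr perm → Spec_is_incr_next_incr perm (is_incr_next_incr perm)

-- ===== LEMMAS AND PROOFS =====
-- number of adjacent descents
def pvCnt (l : List Int) : Nat := (l.zip l.tail).countP (fun p => decide (p.2 < p.1))

theorem pvCnt_cons_cons (a b : Int) (rest : List Int) :
    pvCnt (a :: b :: rest) = (if b < a then 1 else 0) + pvCnt (b :: rest) := by
  simp only [pvCnt, List.zip_cons_cons, List.tail_cons, List.countP_cons]
  split_ifs <;> simp_all <;> omega

theorem pvInnerA_eq (l : List Int) : pvInnerA l = decide (pvCnt l = 0) := by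
  induction l with
  | nil => simp [pvInnerA, pvCnt]
  | cons a t ih =>
    cases t with
    | nil => simp [pvInnerA, pvCnt]
    | cons b rest =>
      rw [pvInnerA, pvCnt_cons_cons, ih]
      split_ifs <;> simp_all

theorem pvOuterA_eq (l : List Int) : pvOuterA l = decide (pvCnt l ≤ 1) := by
  induction l with
  | nil => simp [pvOuterA, pvCnt]
  | cons a t ih =>
    cases t with
    | nil => simp [pvOuterA, pvCnt]
    | cons b rest =>
      rw [pvOuterA, pvCnt_cons_cons, pvInnerA_eq, ih]
      split_ifs <;> simp_all

-- B's fold invariant: with a nonempty current run ending in a, the final run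
-- count is runs.length + 1 + (descents of a :: rest), and the final current run is nonempty.
theorem pvFoldB_inv (rest : List Int) :
    ∀ (runs : List (List Int)) (cur : List Int) (a : Int), cur.getLast? = some a →
      (rest.foldl pvStepB (runs, cur)).2 ≠ [] ∧
      ((rest.foldl pvStepB (runs, cur)).1.length + 1 =
        runs.length + 1 + pvCnt (a :: rest)) := by
  induction rest with
  | nil =>
    intro runs cur a h
    simp only [List.foldl_nil]
    refine ⟨fun hc => by rw [hc] at h; simp at h, ?_⟩
    have hc : pvCnt [a] = 0 := rfl
    omega
  | cons x rest ih =>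
    intro runs cur a h
    have hcur : cur ≠ [] := fun hc => by simp [hc] at h
    have hlast : cur.getLast! = a := List.getLast!_of_getLast? h
    rw [List.foldl_cons, pvCnt_cons_cons]
    by_cases hx : x < a
    · have : pvStepB (runs, cur) x = (runs ++ [cur], [x]) := by
        simp [pvStepB, hcur, h, hx]
      rw [this]
      have := ih (runs ++ [cur]) [x] x (by simp)
      refine ⟨this.1, ?_⟩
      rw [this.2]; simp [hx]; omega
    · have : pvStepB (runs, cur) x = (runs, cur ++ [x]) := by
        simp [pvStepB, h, hx]
      rw [this]
      have := ih runs (cur ++ [x]) x (by simp)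
      refine ⟨this.1, ?_⟩
      rw [this.2]; simp [hx]
theorem pvAlt_eq (l : List Int) : is_incr_next_incr_alt l = decide (pvCnt l ≤ 1) := by
  cases l with
  | nil => simp [is_incr_next_incr_alt, pvFinishB, pvCnt]
  | cons p rest =>
    have hstep : pvStepB ([], []) p = ([], [p]) := by simp [pvStepB]
    have hinv := pvFoldB_inv rest [] [p] p (by simp)
    unfold is_incr_next_incr_alt pvFinishB
    rw [List.foldl_cons, hstep]
    rw [if_neg hinv.1]
    simp only [List.length_append, List.length_cons, List.length_nil]
    rw [decide_eq_decide]
    have := hinv.2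
    simp only [List.length_nil] at this
    omega

-- ===== VERDICT (by name: the statement is the Claim_ definition above) =====
theorem is_incr_next_incr_spec : Claim_equal_is_incr_next_incr := by
  intro perm _
  unfold Spec_is_incr_next_incr is_incr_next_incr
  rw [pvOuterA_eq, pvAlt_eq]
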